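-- pv_equiv track=rewrite | github.com/DaniDiazTech/Python-basic-Problems | Problems/Other_problems/Fun with List/delete_duplicated.py | delete_duplicated
-- ===== SOURCE A (Python) =====
-- def delete_duplicated(list1):
--     copy_list = list1.copy()
--
--     remove_index = []
--
--     counter = 0
--     for index, element in enumerate(list1):
--         """
--         Check if the current element is the same as the next element
--         and remove it
--         """
--         if not index + 1 == len(list1):
--             if element == list1[index + 1]:
--                 remove_index.append(index)
--
--     for i in remove_index:
--         del copy_list[i - counter]
--         counter += 1
--
--     return copy_list
-- ===== SOURCE B (Python) =====
-- def delete_duplicated(list1):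
--     # keep an element when it differs from its successor; the last element always stays
--     result = [x for x, y in zip(list1, list1[1:]) if x != y]
--     if list1:
--         result.append(list1[-1])
--     return result
-- ===== Notes on version B (the rewrite author's own statement) =====
-- stated objective: alternative
-- what changed: Replaced the two-phase collect-indices-then-delete-with-shifting-counter algorithm by a single pass that keeps each element differing from its successor (plus the last element).
import Mathlib
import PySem

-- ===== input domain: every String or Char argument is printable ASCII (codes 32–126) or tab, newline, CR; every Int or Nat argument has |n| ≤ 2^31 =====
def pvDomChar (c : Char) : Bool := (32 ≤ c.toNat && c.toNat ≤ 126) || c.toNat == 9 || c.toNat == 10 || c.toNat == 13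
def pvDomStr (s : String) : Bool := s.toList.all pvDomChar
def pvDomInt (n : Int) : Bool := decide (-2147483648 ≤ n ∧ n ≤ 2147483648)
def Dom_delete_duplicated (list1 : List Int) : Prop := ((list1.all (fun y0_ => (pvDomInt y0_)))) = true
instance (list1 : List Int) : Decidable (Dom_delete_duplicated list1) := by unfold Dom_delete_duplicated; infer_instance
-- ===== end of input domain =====

-- B replaces A's collect-adjacent-duplicate-indices-then-delete-with-a-shifting-counter
-- algorithm by a single pass that keeps each element differing from its successor.

-- ===== PORT A =====
-- first loop body: if not index+1 == len(list1): if element == list1[index+1]: remove_index.append(index)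
-- (list1[index+1] is ported as pyGetD with default 0: under the guard index+1 is always in range, so exact)
def pvRemStep (list1 : List Int) (acc : List Int) (ie : Int × Int) : List Int :=
  if ¬ (ie.1 + 1 == (list1.length : Int)) then
    if ie.2 == PySem.List.pyGetD list1 (ie.1 + 1) 0 then acc ++ [ie.1] else acc
  else acc

-- second loop body: del copy_list[i - counter]; counter += 1
-- (the 'none' branch is unreachable: the collected indices are always in range, Python never raises here)
def pvDelStep (st : List Int × Int) (i : Int) : List Int × Int :=
  match PySem.List.pop? st.1 (i - st.2) with
  | some (_, rest) => (rest, st.2 + 1)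
  | none => (st.1, st.2 + 1)

def delete_duplicated (list1 : List Int) : List Int :=
  let copy_list := list1
  let remove_index := (PySem.List.enumerate list1 0).foldl (pvRemStep list1) []
  (remove_index.foldl pvDelStep (copy_list, 0)).1

-- ===== PORT B =====
-- list1[1:] is ported as drop 1; list1[-1] under the nonempty guard as getLast?
def delete_duplicated_alt (list1 : List Int) : List Int :=
  let result := ((list1.zip (list1.drop 1)).filter (fun p => p.1 != p.2)).map (fun p => p.1)
  match list1.getLast? with
  | some last => result ++ [last]
  | none => result

-- ===== PRECONDITION & SPEC =====
def Spec_delete_duplicated (list1 : List Int) (out : List Int) : Prop := out = delete_duplicated_alt list1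
instance (list1 : List Int) (out : List Int) : Decidable (Spec_delete_duplicated list1 out) := by unfold Spec_delete_duplicated; infer_instance

-- ===== CLAIM (what is proved, stated in full; the proofs are below) =====
def Claim_equal_delete_duplicated : Prop := ∀ (list1 : List Int), Dom_delete_duplicated list1 → Spec_delete_duplicated list1 (delete_duplicated list1)

-- ===== LEMMAS AND PROOFS =====

-- the list of adjacent-duplicate positions A's first loop collects, defined structurally
def pvRidx : List Int → List Int
  | x :: y :: t =>
      if x = y then (0 : Int) :: (pvRidx (y :: t)).map (· + 1)
      else (pvRidx (y :: t)).map (· + 1)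
  | _ => []

-- the common reference function: keep an element iff it differs from its successor
def pvKeep : List Int → List Int
  | [] => []
  | [x] => [x]
  | x :: y :: t => if x = y then pvKeep (y :: t) else x :: pvKeep (y :: t)

theorem pvRidx_bounds : ∀ (l : List Int), ∀ i ∈ pvRidx l, 0 ≤ i ∧ i + 1 < (l.length : Int) := by
  intro l
  induction l using pvKeep.induct with
  | case1 => simp [pvRidx]
  | case2 x => simp [pvRidx]
  | case3 y t ih =>
      intro i hi
      rw [pvRidx, if_pos rfl] at hi
      simp only [List.mem_cons, List.mem_map] at hi
      rcases hi with rfl | ⟨j, hj, rfl⟩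
      · constructor <;> simp
      · have := ih j hj
        simp at this ⊢; omega
  | case4 x y t h ih =>
      intro i hi
      rw [pvRidx, if_neg h] at hi
      simp only [List.mem_map] at hi
      rcases hi with ⟨j, hj, rfl⟩
      have := ih j hj
      simp at this ⊢; omega

theorem pvRidx_pairwise : ∀ (l : List Int), (pvRidx l).Pairwise (· < ·) := by
  intro l
  induction l using pvKeep.induct with
  | case1 => simp [pvRidx]
  | case2 x => simp [pvRidx]
  | case3 y t ih =>
      rw [pvRidx, if_pos rfl]
      refine List.Pairwise.cons ?_ (List.Pairwise.map _ (by intro a b hab; omega) ih)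
      intro j hj
      simp only [List.mem_map] at hj
      rcases hj with ⟨k, hk, rfl⟩
      have := pvRidx_bounds (y :: t) k hk
      omega
  | case4 x y t h ih =>
      rw [pvRidx, if_neg h]
      exact List.Pairwise.map _ (by intro a b hab; omega) ih

-- counter shift: shifting all indices and the counter by 1 changes nothing
theorem pvDel_shift_counter : ∀ (r : List Int) (l : List Int) (c : Int),
    (r.map (· + 1)).foldl pvDelStep (l, c + 1) =
      ((r.foldl pvDelStep (l, c)).1, (r.foldl pvDelStep (l, c)).2 + 1) := by
  intro r
  induction r with
  | nil => intro l c; rfl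
  | cons i r ih =>
      intro l c
      simp only [List.map_cons, List.foldl_cons]
      have e : pvDelStep (l, c + 1) (i + 1) =
          ((pvDelStep (l, c) i).1, (pvDelStep (l, c) i).2 + 1) := by
        unfold pvDelStep
        have : i + 1 - (c + 1) = i - c := by omega
        rw [this]
        cases PySem.List.pop? l (i - c) with
        | none => rfl
        | some p => rfl
      rw [e]
      exact ih _ _

-- list shift: in-range indices shifted by 1 never touch the head
theorem pvDel_shift_list : ∀ (r : List Int) (x : Int) (l : List Int) (c : Int),
    r.Pairwise (· < ·) → (∀ i ∈ r, c ≤ i ∧ i < c + (l.length : Int)) →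
    (r.map (· + 1)).foldl pvDelStep (x :: l, c) =
      (x :: (r.foldl pvDelStep (l, c)).1, (r.foldl pvDelStep (l, c)).2) := by
  intro r
  induction r with
  | nil => intro x l c _ _; rfl
  | cons i r ih =>
      intro x l c hp hb
      obtain ⟨hci, hil⟩ := hb i (List.mem_cons_self ..)
      set m : Nat := (i - c).toNat with hm
      have him : i - c = (m : Int) := by omega
      have hmlt : m < l.length := by omega
      have pop_l : PySem.List.pop? l (i - c) = some (l[m], l.eraseIdx m) := by
        rw [him]; exact PySem.List.pop?_natCast l m hmlt
      have pop_xl : PySem.List.pop? (x :: l) (i + 1 - c) = some (l[m], x :: l.eraseIdx m) := by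
        have h1 : i + 1 - c = ((m + 1 : Nat) : Int) := by omega
        have h2 : m + 1 < (x :: l).length := by simp; omega
        rw [h1, PySem.List.pop?_natCast (x :: l) (m + 1) h2]
        simp [List.eraseIdx_cons_succ]
      simp only [List.map_cons, List.foldl_cons]
      have e1 : pvDelStep (x :: l, c) (i + 1) = (x :: l.eraseIdx m, c + 1) := by
        unfold pvDelStep; rw [pop_xl]
      have e2 : pvDelStep (l, c) i = (l.eraseIdx m, c + 1) := by
        unfold pvDelStep; rw [pop_l]
      rw [e1, e2]
      apply ih
      · exact hp.of_cons
      · intro j hj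
        have hij : i < j := (List.pairwise_cons.mp hp).1 j hj
        have := hb j (List.mem_cons_of_mem _ hj)
        have hle : (l.eraseIdx m).length = l.length - 1 := by
          rw [List.length_eraseIdx]; simp [hmlt]
        constructor
        · omega
        · rw [hle]; omega

-- A's first loop collects exactly pvRidx (generalised over the position of the suffix)
theorem pvRem_gen : ∀ (t l : List Int) (k : Nat) (acc : List Int),
    l.drop k = t →
    (PySem.List.enumerate t (k : Int)).foldl (pvRemStep l) acc
      = acc ++ (pvRidx t).map (· + (k : Int)) := by
  intro t
  induction t with
  | nil => intro l k acc _; simp [PySem.List.enumerate_nil, pvRidx]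
  | cons x t' ih =>
      intro l k acc hdrop
      have hlen : l.length = k + 1 + t'.length := by
        have := congrArg List.length hdrop
        simp [List.length_drop] at this
        omega
      rw [PySem.List.enumerate_cons]
      simp only [List.foldl_cons]
      have hdrop' : l.drop (k + 1) = t' := by
        rw [show k + 1 = k + 1 from rfl, ← List.drop_drop, hdrop]
        rfl
      cases t' with
      | nil =>
          have estep : pvRemStep l acc ((k : Int), x) = acc := by
            unfold pvRemStep
            simp [hlen]
          rw [estep]
          have h1 : ((k : Int) + 1) = ((k + 1 : Nat) : Int) := by push_cast; ring
          rw [h1, ih l (k + 1) acc hdrop']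
          simp [pvRidx]
      | cons y t'' =>
          have hy : PySem.List.pyGetD l ((k : Int) + 1) 0 = y := by
            have h1 : ((k : Int) + 1) = ((k + 1 : Nat) : Int) := by push_cast; ring
            rw [h1, PySem.List.pyGetD_natCast]
            have : l[(k+1)]? = some y := by
              have h2 : (List.drop (k+1) l)[0]? = l[(k+1)+0]? := List.getElem?_drop
              rw [hdrop'] at h2
              simpa using h2.symm
            simp [List.getD, this]
          have hguard : ¬ ((k : Int) + 1 = (l.length : Int)) := by
            simp [hlen]; push_cast; omega
          have estep : pvRemStep l acc ((k : Int), x) =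
              if x = y then acc ++ [(k : Int)] else acc := by
            unfold pvRemStep
            simp [hguard, hy]
          rw [estep]
          have h1 : ((k : Int) + 1) = ((k + 1 : Nat) : Int) := by push_cast; ring
          rw [h1, ih l (k + 1) _ hdrop']
          have hcomp : ((fun x => x + (k : Int)) ∘ fun x => x + 1) =
              (fun x => x + ((k + 1 : Nat) : Int)) := by
            funext a; simp; push_cast; ring
          by_cases hxy : x = y
          · rw [if_pos hxy, pvRidx, if_pos hxy]
            simp only [List.map_cons, List.map_map, hcomp, List.append_assoc,
              List.singleton_append]
            norm_num
          · rw [if_neg hxy, pvRidx, if_neg hxy]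
            simp only [List.map_map, hcomp]

theorem pvRem_eq (l : List Int) :
    (PySem.List.enumerate l 0).foldl (pvRemStep l) [] = pvRidx l := by
  have := pvRem_gen l l 0 [] (by simp)
  simpa using this

-- A's deletion loop applied to pvRidx realises pvKeep
theorem pvDel_ridx : ∀ (l : List Int), ((pvRidx l).foldl pvDelStep (l, 0)).1 = pvKeep l := by
  intro l
  induction l using pvKeep.induct with
  | case1 => rfl
  | case2 x => rfl
  | case3 y t ih =>
      rw [pvRidx, if_pos rfl, pvKeep]
      simp only [List.foldl_cons]
      have estep : pvDelStep (y :: y :: t, 0) 0 = (y :: t, 1) := by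
        unfold pvDelStep
        simp [PySem.List.pop?_zero_cons]
      rw [estep]
      have hsc := pvDel_shift_counter (pvRidx (y :: t)) (y :: t) 0
      norm_num at hsc
      rw [hsc]
      simp [ih]
  | case4 x y t h ih =>
      rw [pvRidx, if_neg h, pvKeep, if_neg h]
      rw [pvDel_shift_list (pvRidx (y :: t)) x (y :: t) 0 (pvRidx_pairwise _) ?_]
      · rw [ih]
      · intro i hi
        have := pvRidx_bounds (y :: t) i hi
        constructor
        · exact this.1
        · have h2 := this.2; omega

theorem pvA_eq_keep (l : List Int) : delete_duplicated l = pvKeep l := by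
  unfold delete_duplicated
  rw [pvRem_eq]
  exact pvDel_ridx l

theorem pvB_eq_keep (l : List Int) : delete_duplicated_alt l = pvKeep l := by
  induction l using pvKeep.induct with
  | case1 => rfl
  | case2 x => rfl
  | case3 y t ih =>
      have e : delete_duplicated_alt (y :: y :: t) = delete_duplicated_alt (y :: t) := by
        unfold delete_duplicated_alt
        simp [List.getLast?_cons_cons]
      rw [e, ih, pvKeep]; simp
  | case4 x y t h ih =>
      have e : delete_duplicated_alt (x :: y :: t) = x :: delete_duplicated_alt (y :: t) := by
        unfold delete_duplicated_alt
        cases h' : (y :: t).getLast? with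
        | none => simp at h'
        | some last => simp [List.getLast?_cons_cons, h', bne_iff_ne, h]
      rw [e, ih, pvKeep]; simp [h]

-- ===== VERDICT (by name: the statement is the Claim_ definition above) =====
theorem delete_duplicated_spec : Claim_equal_delete_duplicated := by
  intro l _
  unfold Spec_delete_duplicated
  rw [pvA_eq_keep, pvB_eq_keep]
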